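-- pv_equiv track=rewrite | github.com/GovReady/mondrianish | mondrianish/__init__.py | draw_as_ascii_art_grid
-- ===== SOURCE A (Python) =====
-- def draw_as_ascii_art_grid(canvas_size, lines, rectangles):
--   # Draw the grided lines and rectangles returned by generate_grid as
--   # ASCII art. Returns two HEIGHTxWIDTH arrays of arrays, one for lines
--   # and one for rectangles. The first, for lines, has an ASCII line
--   # drawing character in each cell, or None if there is no line at the
--   # character position. The second array, for rectangles, has an integer
--   # indicating a color to draw at each character position, or None (if
--   # there is a line there).
--
--   # Draw rectangles to a HEIGHTxWIDTH array of array of character values.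
--   # Assign integers to the cells to represent the color to draw in that
--   # character position.
--   ascii_art_rects = [[None]*canvas_size[0] for _ in range(canvas_size[1])]
--   for i, rect in enumerate(rectangles):
--     for x in range(rect[0][0], rect[1][0]+1):
--       for y in range(rect[0][1], rect[1][1]+1):
--         ascii_art_rects[y][x] = i
--
--   # Draw the lines to a HEIGHTxWIDTH array of array of length-one strings.
--   # Assign an "X" to any position that a line should be drawn at, and leave
--   # other cells empty.
--   ascii_art_lines = [[None]*canvas_size[0] for _ in range(canvas_size[1])]
--   for line in lines:
--     for x in range(line[0][0], line[1][0]+1):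
--       for y in range(line[0][1], line[1][1]+1):
--         ascii_art_lines[y][x] = "X"
--
--   # Re-draw as ASCII line drawing characters depending on neighboring segments.
--   ascii_art_lines_original = [list(row) for row in ascii_art_lines]
--   def isline(x, y):
--     if x < 0 or y < 0 or x >= canvas_size[0] or y >= canvas_size[1]:
--       return False
--     return ascii_art_lines_original[y][x]
--   for x in range(canvas_size[0]):
--     for y in range(canvas_size[1]):
--       if isline(x, y):
--         if isline(x-1, y) and isline(x+1, y) and isline(x, y-1) and isline(x, y+1):
--           ascii_art_lines[y][x] = "┼"
--         elif isline(x-1, y) and isline(x+1, y) and isline(x, y-1):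
--           ascii_art_lines[y][x] = "┴"
--         elif isline(x-1, y) and isline(x+1, y) and isline(x, y+1):
--           ascii_art_lines[y][x] = "┬"
--         elif isline(x-1, y) and isline(x, y-1) and isline(x, y+1):
--           ascii_art_lines[y][x] = "┤"
--         elif isline(x+1, y) and isline(x, y-1) and isline(x, y+1):
--           ascii_art_lines[y][x] = "├"
--         elif isline(x-1, y) or isline(x+1, y):
--           ascii_art_lines[y][x] = "─"
--         elif isline(x, y-1) or isline(x, y+1):
--           ascii_art_lines[y][x] = "│"
--
--   return ascii_art_lines, ascii_art_rects
-- ===== SOURCE B (Python) =====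
-- # B: functional per-cell computation -- no grid mutation; each cell of the line
-- # grid is computed from a coverage predicate plus a 16-entry glyph table, and
-- # each rectangle cell by a reversed first-match scan (last writer wins).
-- GLYPHS = ["X", "\u2500", "\u2500", "\u2500", "\u2502", "\u2500", "\u2500", "\u2534",
--           "\u2502", "\u2500", "\u2500", "\u252c", "\u2502", "\u2524", "\u251c", "\u253c"]
--
-- def draw_as_ascii_art_grid(canvas_size, lines, rectangles):
--   W, H = canvas_size
--   def inbox(seg, x, y):
--     return seg[0][0] <= x <= seg[1][0] and seg[0][1] <= y <= seg[1][1]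
--   def isline(x, y):
--     return 0 <= x < W and 0 <= y < H and any(inbox(l, x, y) for l in lines)
--   def line_char(x, y):
--     if not isline(x, y):
--       return None
--     m = ((1 if isline(x - 1, y) else 0) + (2 if isline(x + 1, y) else 0)
--          + (4 if isline(x, y - 1) else 0) + (8 if isline(x, y + 1) else 0))
--     return GLYPHS[m]
--   rev = list(reversed(list(enumerate(rectangles))))
--   def rect_color(x, y):
--     for i, r in rev:
--       if inbox(r, x, y):
--         return i
--     return None
--   return ([[line_char(x, y) for x in range(W)] for y in range(H)],
--           [[rect_color(x, y) for x in range(W)] for y in range(H)])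
-- ===== Notes on version B (the rewrite author's own statement) =====
-- stated objective: alternative
-- what changed: A rasterizes by three mutate-in-place passes over shared 2D arrays (fill loops plus an elif chain re-drawing line cells); B computes every cell purely: a coverage predicate over the segments, a 16-entry neighbour-mask glyph table replacing the elif chain, and a reversed first-match scan over enumerate(rectangles) replacing overwrite order.
-- intended difference: On inputs where some line or rectangle with nonempty ranges starts at a negative coordinate, A silently paints cells at the opposite edge of the grid via Python negative-index wraparound, while B paints only the cells the segment actually names, which is the intended geometry. — e.g. on draw_as_ascii_art_grid((3, 1), ([((-1, 0), (-1, 0))], [])): A returns ([[none, none, some "X"]], [[none, none, none]]), B returns ([[none, none, none]], [[none, none, none]])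
import Mathlib
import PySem

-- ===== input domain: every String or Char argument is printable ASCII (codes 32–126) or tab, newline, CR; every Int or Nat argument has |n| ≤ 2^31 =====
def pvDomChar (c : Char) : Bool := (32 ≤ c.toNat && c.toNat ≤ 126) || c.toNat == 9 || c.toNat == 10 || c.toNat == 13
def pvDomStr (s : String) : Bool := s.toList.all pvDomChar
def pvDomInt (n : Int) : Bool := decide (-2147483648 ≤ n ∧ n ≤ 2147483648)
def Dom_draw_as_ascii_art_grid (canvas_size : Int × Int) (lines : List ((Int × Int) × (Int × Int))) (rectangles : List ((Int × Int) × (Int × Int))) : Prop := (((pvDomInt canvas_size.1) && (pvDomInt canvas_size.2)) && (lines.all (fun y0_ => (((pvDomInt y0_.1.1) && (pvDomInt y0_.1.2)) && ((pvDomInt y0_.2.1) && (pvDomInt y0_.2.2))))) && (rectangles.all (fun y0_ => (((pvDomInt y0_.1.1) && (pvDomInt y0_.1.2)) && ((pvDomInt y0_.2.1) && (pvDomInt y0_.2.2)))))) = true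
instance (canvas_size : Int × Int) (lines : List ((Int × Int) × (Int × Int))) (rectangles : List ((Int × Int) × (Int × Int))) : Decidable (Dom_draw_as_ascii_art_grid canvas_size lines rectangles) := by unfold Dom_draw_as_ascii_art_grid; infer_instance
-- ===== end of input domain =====

-- B replaces A's three mutate-in-place rasterization passes by a pure per-cell
-- computation (coverage predicate + 16-entry glyph table + reversed first-match
-- scan); equivalence is about the return value (A mutates only locals); on
-- segments with a negative start coordinate (D_) A wraps to the opposite edge
-- while B paints only the named cells.

-- ===== PORT A =====

-- `grid[y][x] = v` (Python 2-level list assignment; negative indices wrap,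
-- out-of-range = IndexError = `none` branches, excluded by Pre_).
def pySet2 {α : Type} (g : List (List α)) (y x : Int) (v : α) : List (List α) :=
  match PySem.List.pyGet? g y with
  | none => g
  | some row =>
    match PySem.List.pySet? row x v with
    | none => g
    | some row' => PySem.List.pySetD g y row'

-- the shared nested-loop body `for x in range(x0, x1+1): for y in range(y0, y1+1): grid[y][x] = v`
def fill2 {α : Type} (g : List (List (Option α))) (x0 x1 y0 y1 : Int) (v : α) : List (List (Option α)) :=
  (PySem.List.pyRange x0 (x1 + 1) 1).foldl (fun g x =>
    (PySem.List.pyRange y0 (y1 + 1) 1).foldl (fun g y => pySet2 g y x (some v)) g) g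

-- Python truthiness of a cell (None falsy, a string truthy iff nonempty)
def truthyCell (o : Option String) : Bool :=
  match o with
  | none => false
  | some s => decide (s ≠ "")

def islineA (W H : Int) (snap : List (List (Option String))) (x y : Int) : Bool :=
  if x < 0 ∨ y < 0 ∨ x ≥ W ∨ y ≥ H then false
  else truthyCell (PySem.List.pyGetD (PySem.List.pyGetD snap y []) x none)

-- body of A's re-classification loop (the if/elif chain)
def updA (W H : Int) (snap : List (List (Option String))) (g : List (List (Option String))) (x y : Int) : List (List (Option String)) :=
  if islineA W H snap x y then
    if islineA W H snap (x-1) y && islineA W H snap (x+1) y && islineA W H snap x (y-1) && islineA W H snap x (y+1) then pySet2 g y x (some "┼")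
    else if islineA W H snap (x-1) y && islineA W H snap (x+1) y && islineA W H snap x (y-1) then pySet2 g y x (some "┴")
    else if islineA W H snap (x-1) y && islineA W H snap (x+1) y && islineA W H snap x (y+1) then pySet2 g y x (some "┬")
    else if islineA W H snap (x-1) y && islineA W H snap x (y-1) && islineA W H snap x (y+1) then pySet2 g y x (some "┤")
    else if islineA W H snap (x+1) y && islineA W H snap x (y-1) && islineA W H snap x (y+1) then pySet2 g y x (some "├")
    else if islineA W H snap (x-1) y || islineA W H snap (x+1) y then pySet2 g y x (some "─")
    else if islineA W H snap x (y-1) || islineA W H snap x (y+1) then pySet2 g y x (some "│")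
    else g
  else g

def draw_as_ascii_art_grid (canvas_size : Int × Int) (lines : List ((Int × Int) × (Int × Int))) (rectangles : List ((Int × Int) × (Int × Int))) : List (List (Option String)) × List (List (Option Int)) :=
  let W := canvas_size.1
  let H := canvas_size.2
  let ascii_art_rects : List (List (Option Int)) := List.replicate H.toNat (List.replicate W.toNat none)
  let ascii_art_rects := (PySem.List.enumerate rectangles 0).foldl
    (fun g p => fill2 g p.2.1.1 p.2.2.1 p.2.1.2 p.2.2.2 p.1) ascii_art_rects
  let ascii_art_lines : List (List (Option String)) := List.replicate H.toNat (List.replicate W.toNat none)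
  let ascii_art_lines := lines.foldl (fun g l => fill2 g l.1.1 l.2.1 l.1.2 l.2.2 "X") ascii_art_lines
  let snap := ascii_art_lines.map (fun row => row)
  let ascii_art_lines := (PySem.List.pyRange 0 W 1).foldl (fun g x =>
    (PySem.List.pyRange 0 H 1).foldl (fun g y => updA W H snap g x y) g) ascii_art_lines
  (ascii_art_lines, ascii_art_rects)

-- ===== PORT B =====

def inboxB (seg : (Int × Int) × (Int × Int)) (x y : Int) : Bool :=
  decide (seg.1.1 ≤ x) && decide (x ≤ seg.2.1) && decide (seg.1.2 ≤ y) && decide (y ≤ seg.2.2)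

def islineB (W H : Int) (lines : List ((Int × Int) × (Int × Int))) (x y : Int) : Bool :=
  decide (0 ≤ x) && decide (x < W) && decide (0 ≤ y) && decide (y < H) && lines.any (fun l => inboxB l x y)

def glyphsB : List String := ["X", "─", "─", "─", "│", "─", "─", "┴", "│", "─", "─", "┬", "│", "┤", "├", "┼"]

def lineCharB (W H : Int) (lines : List ((Int × Int) × (Int × Int))) (x y : Int) : Option String :=
  if islineB W H lines x y then
    some (glyphsB.getD
      ((if islineB W H lines (x-1) y then 1 else 0) + (if islineB W H lines (x+1) y then 2 else 0)
       + (if islineB W H lines x (y-1) then 4 else 0) + (if islineB W H lines x (y+1) then 8 else 0)) "X")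
  else none

def firstHitB (l : List (Int × ((Int × Int) × (Int × Int)))) (x y : Int) : Option Int :=
  match l with
  | [] => none
  | p :: t => if inboxB p.2 x y then some p.1 else firstHitB t x y

def draw_as_ascii_art_grid_alt (canvas_size : Int × Int) (lines : List ((Int × Int) × (Int × Int))) (rectangles : List ((Int × Int) × (Int × Int))) : List (List (Option String)) × List (List (Option Int)) :=
  let W := canvas_size.1
  let H := canvas_size.2
  let rev := (PySem.List.enumerate rectangles 0).reverse
  ((PySem.List.pyRange 0 H 1).map (fun y => (PySem.List.pyRange 0 W 1).map (fun x => lineCharB W H lines x y)),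
   (PySem.List.pyRange 0 H 1).map (fun y => (PySem.List.pyRange 0 W 1).map (fun x => firstHitB rev x y)))

-- ===== PRECONDITION & SPEC =====

-- a segment is harmless iff its x- or y-range is empty (no write happens) or every
-- write indexes within Python's negative-wrap range of the grid (no IndexError)
def nonRaiseSeg (W H : Int) (s : (Int × Int) × (Int × Int)) : Prop :=
  s.2.1 < s.1.1 ∨ s.2.2 < s.1.2 ∨
  (-(W.toNat : Int) ≤ s.1.1 ∧ s.2.1 < (W.toNat : Int) ∧
   -(H.toNat : Int) ≤ s.1.2 ∧ s.2.2 < (H.toNat : Int))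

-- Pre_ admits exactly the inputs on which A returns normally: it excludes only the
-- inputs on which A raises IndexError (a nonempty segment indexing beyond the grid).
def Pre_draw_as_ascii_art_grid (canvas_size : Int × Int) (lines : List ((Int × Int) × (Int × Int))) (rectangles : List ((Int × Int) × (Int × Int))) : Prop :=
  (∀ s ∈ lines, nonRaiseSeg canvas_size.1 canvas_size.2 s) ∧
  (∀ s ∈ rectangles, nonRaiseSeg canvas_size.1 canvas_size.2 s)

instance (canvas_size : Int × Int) (lines : List ((Int × Int) × (Int × Int))) (rectangles : List ((Int × Int) × (Int × Int))) : Decidable (Pre_draw_as_ascii_art_grid canvas_size lines rectangles) := by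
  unfold Pre_draw_as_ascii_art_grid nonRaiseSeg; infer_instance

def pvWitness_draw_as_ascii_art_grid : (Int × Int) × (List ((Int × Int) × (Int × Int))) × (List ((Int × Int) × (Int × Int))) :=
  ((3, 3), ([((0, 0), (2, 0)), ((1, 0), (1, 2))], [((0, 1), (2, 2))]))

-- On inputs where some line or rectangle with nonempty ranges starts at a negative
-- coordinate, A silently paints cells at the opposite edge of the grid (Python
-- negative-index wraparound); B paints only the cells the segment actually names,
-- which is the intended geometry.
def D_draw_as_ascii_art_grid (canvas_size : Int × Int) (lines : List ((Int × Int) × (Int × Int))) (rectangles : List ((Int × Int) × (Int × Int))) : Prop :=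
  ∃ s ∈ lines ++ rectangles, s.1.1 ≤ s.2.1 ∧ s.1.2 ≤ s.2.2 ∧ (s.1.1 < 0 ∨ s.1.2 < 0)

instance (canvas_size : Int × Int) (lines : List ((Int × Int) × (Int × Int))) (rectangles : List ((Int × Int) × (Int × Int))) : Decidable (D_draw_as_ascii_art_grid canvas_size lines rectangles) := by
  unfold D_draw_as_ascii_art_grid; infer_instance

def Spec_draw_as_ascii_art_grid (canvas_size : Int × Int) (lines : List ((Int × Int) × (Int × Int))) (rectangles : List ((Int × Int) × (Int × Int))) (out : List (List (Option String)) × List (List (Option Int))) : Prop := ¬ D_draw_as_ascii_art_grid canvas_size lines rectangles → out = draw_as_ascii_art_grid_alt canvas_size lines rectangles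
instance (canvas_size : Int × Int) (lines : List ((Int × Int) × (Int × Int))) (rectangles : List ((Int × Int) × (Int × Int))) (out : List (List (Option String)) × List (List (Option Int))) : Decidable (Spec_draw_as_ascii_art_grid canvas_size lines rectangles out) := by unfold Spec_draw_as_ascii_art_grid; infer_instance

def pvDiffWitness_draw_as_ascii_art_grid : (Int × Int) × (List ((Int × Int) × (Int × Int))) × (List ((Int × Int) × (Int × Int))) :=
  ((3, 1), ([((-1, 0), (-1, 0))], []))

def pvDiffWitnessOut_draw_as_ascii_art_grid : (List (List (Option String)) × List (List (Option Int))) × (List (List (Option String)) × List (List (Option Int))) :=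
  (([[none, none, some "X"]], [[none, none, none]]), ([[none, none, none]], [[none, none, none]]))

-- ===== CLAIM (what is proved, stated in full; the proofs are below) =====
def Claim_unchanged_draw_as_ascii_art_grid : Prop := ∀ (canvas_size : Int × Int) (lines : List ((Int × Int) × (Int × Int))) (rectangles : List ((Int × Int) × (Int × Int))), Dom_draw_as_ascii_art_grid canvas_size lines rectangles → Pre_draw_as_ascii_art_grid canvas_size lines rectangles → Spec_draw_as_ascii_art_grid canvas_size lines rectangles (draw_as_ascii_art_grid canvas_size lines rectangles)

def Claim_changed_draw_as_ascii_art_grid : Prop := Dom_draw_as_ascii_art_grid (pvDiffWitness_draw_as_ascii_art_grid.1) (pvDiffWitness_draw_as_ascii_art_grid.2.1) (pvDiffWitness_draw_as_ascii_art_grid.2.2) ∧ Pre_draw_as_ascii_art_grid (pvDiffWitness_draw_as_ascii_art_grid.1) (pvDiffWitness_draw_as_ascii_art_grid.2.1) (pvDiffWitness_draw_as_ascii_art_grid.2.2) ∧ D_draw_as_ascii_art_grid (pvDiffWitness_draw_as_ascii_art_grid.1) (pvDiffWitness_draw_as_ascii_art_grid.2.1) (pvDiffWitness_draw_as_ascii_art_grid.2.2)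 ∧ draw_as_ascii_art_grid (pvDiffWitness_draw_as_ascii_art_grid.1) (pvDiffWitness_draw_as_ascii_art_grid.2.1) (pvDiffWitness_draw_as_ascii_art_grid.2.2) = pvDiffWitnessOut_draw_as_ascii_art_grid.1 ∧ draw_as_ascii_art_grid_alt (pvDiffWitness_draw_as_ascii_art_grid.1) (pvDiffWitness_draw_as_ascii_art_grid.2.1) (pvDiffWitness_draw_as_ascii_art_grid.2.2) = pvDiffWitnessOut_draw_as_ascii_art_grid.2 ∧ pvDiffWitnessOut_draw_as_ascii_art_grid.1 ≠ pvDiffWitnessOut_draw_as_ascii_art_grid.2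

-- ===== LEMMAS AND PROOFS =====

def Shape {α : Type} (g : List (List α)) (Hn Wn : Nat) : Prop :=
  g.length = Hn ∧ ∀ r ∈ g, r.length = Wn

def getC {α : Type} (g : List (List (Option α))) (y x : Nat) : Option α :=
  (g.getD y []).getD x none

lemma pySet2_eq_set {α : Type} (g : List (List α)) (y x : Nat) (v : α)
    (hy : y < g.length) (hx : x < (g[y]'hy).length) :
    pySet2 g (y : Int) (x : Int) v = g.set y ((g[y]'hy).set x v) := by
  unfold pySet2
  rw [PySem.List.pyGet?_natCast, List.getElem?_eq_getElem hy]
  simp only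
  rw [PySem.List.pySet?_natCast _ _ _ hx]
  simp only
  rw [PySem.List.pySetD_natCast]

lemma pySet2_shape {α : Type} (g : List (List α)) (y x : Int) (v : α) (Hn Wn : Nat)
    (hs : Shape g Hn Wn) : Shape (pySet2 g y x v) Hn Wn := by
  obtain ⟨h1, h2⟩ := hs
  unfold pySet2
  cases hg : PySem.List.pyGet? g y with
  | none => exact ⟨h1, h2⟩
  | some row =>
    dsimp only
    have hrow : row ∈ g := by
      apply PySem.List.mem_of_pyGet?_eq_some (i := y)
      exact hg
    cases hs2 : PySem.List.pySet? row x v with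
    | none => exact ⟨h1, h2⟩
    | some row' =>
      dsimp only
      have hrl : row'.length = Wn := by
        unfold PySem.List.pySet? at hs2
        cases hk : PySem.List.pyIdx? row.length x with
        | none => rw [hk] at hs2; simp at hs2
        | some k =>
          rw [hk] at hs2
          simp only [Option.map_some, Option.some.injEq] at hs2
          rw [← hs2, List.length_set]
          exact h2 row hrow
      constructor
      · rw [PySem.List.length_pySetD]
        exact h1
      · intro r hr
        unfold PySem.List.pySetD at hr
        cases hk2 : PySem.List.pySet? g y row' with
        | none =>
          rw [hk2] at hr
          simp only [Option.getD_none] at hr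
          exact h2 r hr
        | some g' =>
          rw [hk2] at hr
          simp only [Option.getD_some] at hr
          unfold PySem.List.pySet? at hk2
          cases hk3 : PySem.List.pyIdx? g.length y with
          | none => rw [hk3] at hk2; simp at hk2
          | some k =>
            rw [hk3] at hk2
            simp only [Option.map_some, Option.some.injEq] at hk2
            rw [← hk2] at hr
            rcases List.mem_or_eq_of_mem_set hr with h | h
            · exact h2 r h
            · rw [h]; exact hrl

lemma getC_eq_getElem {α : Type} (g : List (List (Option α))) (y x : Nat)
    (hy : y < g.length) (hx : x < (g[y]'hy).length) :
    getC g y x = (g[y]'hy)[x]'hx := by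
  unfold getC
  simp only [List.getD_eq_getElem?_getD]
  rw [List.getElem?_eq_getElem hy]
  simp only [Option.getD_some]
  rw [List.getElem?_eq_getElem hx]
  simp only [Option.getD_some]

lemma getC_pySet2 {α : Type} (g : List (List (Option α))) (Hn Wn : Nat)
    (hs : Shape g Hn Wn) (y x : Nat) (hy : y < Hn) (hx : x < Wn) (v : Option α)
    (y' x' : Nat) :
    getC (pySet2 g (y : Int) (x : Int) v) y' x'
      = if y' = y ∧ x' = x then v else getC g y' x' := by
  obtain ⟨h1, h2⟩ := hs
  have hyl : y < g.length := by omega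
  have hxr : x < (g[y]'hyl).length := by
    rw [h2 _ (List.getElem_mem hyl)]; exact hx
  rw [pySet2_eq_set g y x v hyl hxr]
  unfold getC
  simp only [List.getD_eq_getElem?_getD, List.getElem?_set]
  rcases eq_or_ne y y' with hyy | hyy
  · rw [if_pos hyy, if_pos hyl, Option.getD_some, List.getElem?_set]
    rcases eq_or_ne x x' with hxx | hxx
    · rw [if_pos hxx, if_pos hxr, Option.getD_some, if_pos ⟨hyy.symm, hxx.symm⟩]
    · rw [if_neg hxx, if_neg (fun hc => hxx hc.2.symm), ← hyy,
        List.getElem?_eq_getElem hyl, Option.getD_some]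
  · rw [if_neg hyy, if_neg (fun hc => hyy hc.1.symm)]

lemma foldl_shape {α β : Type} (f : List (List α) → β → List (List α)) (Hn Wn : Nat)
    (hf : ∀ g b, Shape g Hn Wn → Shape (f g b) Hn Wn) :
    ∀ (l : List β) (g : List (List α)), Shape g Hn Wn → Shape (l.foldl f g) Hn Wn := by
  intro l
  induction l with
  | nil => intro g hs; exact hs
  | cons b t ih => intro g hs; exact ih (f g b) (hf g b hs)

def writeStep {α : Type} (w : Int → Int → Option α) :
    List (List (Option α)) → Int × Int → List (List (Option α)) :=
  fun g p => match w p.2 p.1 with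
    | some v => pySet2 g p.1 p.2 (some v)
    | none => g

lemma getC_foldl_write {α : Type} (w : Int → Int → Option α) (ps : List (Int × Int))
    (g : List (List (Option α))) (Hn Wn : Nat) (hs : Shape g Hn Wn)
    (hin : ∀ p ∈ ps, 0 ≤ p.1 ∧ p.1 < (Hn : Int) ∧ 0 ≤ p.2 ∧ p.2 < (Wn : Int))
    (y x : Nat) (hy : y < Hn) (hx : x < Wn) :
    getC (ps.foldl (writeStep w) g) y x
      = if ((y : Int), (x : Int)) ∈ ps
        then (w (x : Int) (y : Int)).elim (getC g y x) some
        else getC g y x := by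
  induction ps generalizing g with
  | nil => simp
  | cons p t ih =>
    obtain ⟨py, px⟩ := p
    have hb := hin (py, px) (by simp)
    simp only at hb
    have hstep : ∀ g', Shape g' Hn Wn → Shape (writeStep w g' (py, px)) Hn Wn := by
      intro g' hs'
      unfold writeStep
      cases w px py with
      | some v => exact pySet2_shape g' py px (some v) Hn Wn hs'
      | none => exact hs'
    have hother : ∀ g', Shape g' Hn Wn → (py, px) ≠ ((y : Int), (x : Int)) →
        getC (writeStep w g' (py, px)) y x = getC g' y x := by
      intro g' hs' hne
      unfold writeStep
      dsimp only
      cases w px py with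
      | some v =>
        have hpy : py = ((py.toNat : Nat) : Int) := by omega
        have hpx : px = ((px.toNat : Nat) : Int) := by omega
        rw [hpy, hpx, getC_pySet2 g' Hn Wn hs' py.toNat px.toNat (by omega) (by omega)]
        have : ¬ (y = py.toNat ∧ x = px.toNat) := by
          intro hcon
          apply hne
          obtain ⟨hc1, hc2⟩ := hcon
          have e1 : py = (y : Int) := by omega
          have e2 : px = (x : Int) := by omega
          rw [e1, e2]
        rw [if_neg this]
      | none => rfl
    rw [List.foldl_cons]
    rw [ih _ (hstep g hs) (fun q hq => hin q (List.mem_cons_of_mem _ hq))]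
    by_cases hmem : ((y : Int), (x : Int)) ∈ t
    · rw [if_pos hmem, if_pos (List.mem_cons_of_mem _ hmem)]
      cases hw : w (x : Int) (y : Int) with
      | some v => rfl
      | none =>
        dsimp only [Option.elim]
        by_cases hpq : (py, px) = ((y : Int), (x : Int))
        · have e1 : py = (y : Int) := congrArg Prod.fst hpq
          have e2 : px = (x : Int) := congrArg Prod.snd hpq
          have hww : w px py = none := by rw [e1, e2]; exact hw
          unfold writeStep
          dsimp only
          rw [hww]
        · exact hother g hs hpq
    · rw [if_neg hmem]
      by_cases hpq : (py, px) = ((y : Int), (x : Int))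
      · rw [if_pos (by rw [hpq]; exact List.mem_cons_self ..)]
        have e1 : py = (y : Int) := congrArg Prod.fst hpq
        have e2 : px = (x : Int) := congrArg Prod.snd hpq
        cases hw : w (x : Int) (y : Int) with
        | none =>
          dsimp only [Option.elim]
          have hww : w px py = none := by rw [e1, e2]; exact hw
          unfold writeStep
          dsimp only
          rw [hww]
        | some v =>
          dsimp only [Option.elim]
          have hww : w px py = some v := by rw [e1, e2]; exact hw
          unfold writeStep
          dsimp only
          rw [hww]
          dsimp only
          rw [e1, e2, getC_pySet2 g Hn Wn hs y x hy hx, if_pos ⟨rfl, rfl⟩]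
      · have hnm : ¬ ((y : Int), (x : Int)) ∈ (py, px) :: t := by
          intro hcon
          rcases List.mem_cons.1 hcon with h | h
          · exact hpq h.symm
          · exact hmem h
        rw [if_neg hnm]
        exact hother g hs hpq

def fillPairs (x0 x1 y0 y1 : Int) : List (Int × Int) :=
  (PySem.List.pyRange x0 (x1 + 1) 1).flatMap (fun x =>
    (PySem.List.pyRange y0 (y1 + 1) 1).map (fun y => (y, x)))

lemma nested_foldl {γ : Type} (l : List Int) (m : Int → List Int) (f : γ → Int × Int → γ)
    (g : γ) :
    l.foldl (fun a x => (m x).foldl (fun a y => f a (y, x)) a) g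
      = (l.flatMap (fun x => (m x).map (fun y => (y, x)))).foldl f g := by
  induction l generalizing g with
  | nil => rfl
  | cons h t ih =>
    simp only [List.foldl_cons, List.flatMap_cons, List.foldl_append, List.foldl_map]
    exact ih _

lemma fill2_eq_pairs {α : Type} (g : List (List (Option α))) (x0 x1 y0 y1 : Int) (v : α) :
    fill2 g x0 x1 y0 y1 v
      = (fillPairs x0 x1 y0 y1).foldl (writeStep (fun _ _ => some v)) g := by
  unfold fill2 fillPairs
  exact nested_foldl (PySem.List.pyRange x0 (x1 + 1) 1)
    (fun _ => PySem.List.pyRange y0 (y1 + 1) 1) (writeStep (fun _ _ => some v)) g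

lemma mem_fillPairs (x0 x1 y0 y1 a b : Int) :
    (a, b) ∈ fillPairs x0 x1 y0 y1 ↔ (x0 ≤ b ∧ b ≤ x1 ∧ y0 ≤ a ∧ a ≤ y1) := by
  unfold fillPairs
  simp only [List.mem_flatMap, List.mem_map, PySem.List.mem_pyRange_one, Prod.mk.injEq]
  constructor
  · rintro ⟨xx, hx, yy, hy, h1, h2⟩
    omega
  · intro h
    exact ⟨b, by omega, a, by omega, rfl, rfl⟩

lemma fill2_shape {α : Type} (g : List (List (Option α))) (x0 x1 y0 y1 : Int) (v : α)
    (Hn Wn : Nat) (hs : Shape g Hn Wn) : Shape (fill2 g x0 x1 y0 y1 v) Hn Wn := by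
  unfold fill2
  apply foldl_shape _ _ _ _ _ _ hs
  intro g' b hs'
  apply foldl_shape _ _ _ _ _ _ hs'
  intro g'' b' hs''
  exact pySet2_shape _ _ _ _ _ _ hs''

lemma getC_fill2 {α : Type} (g : List (List (Option α))) (Hn Wn : Nat) (hs : Shape g Hn Wn)
    (x0 x1 y0 y1 : Int)
    (hok : x1 < x0 ∨ y1 < y0 ∨ (0 ≤ x0 ∧ x1 < (Wn : Int) ∧ 0 ≤ y0 ∧ y1 < (Hn : Int)))
    (v : α) (y x : Nat) (hy : y < Hn) (hx : x < Wn) :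
    getC (fill2 g x0 x1 y0 y1 v) y x
      = if x0 ≤ (x : Int) ∧ (x : Int) ≤ x1 ∧ y0 ≤ (y : Int) ∧ (y : Int) ≤ y1
        then some v else getC g y x := by
  rw [fill2_eq_pairs]
  have hin : ∀ p ∈ fillPairs x0 x1 y0 y1,
      0 ≤ p.1 ∧ p.1 < (Hn : Int) ∧ 0 ≤ p.2 ∧ p.2 < (Wn : Int) := by
    rintro ⟨a, b⟩ hp
    rw [mem_fillPairs] at hp
    omega
  have h := getC_foldl_write (fun _ _ => some v) (fillPairs x0 x1 y0 y1) g Hn Wn hs hin y x hy hx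
  simp only [Option.elim] at h
  rw [h]
  simp only [mem_fillPairs]

lemma inboxB_iff (s : (Int × Int) × (Int × Int)) (x y : Int) :
    inboxB s x y = true ↔ (s.1.1 ≤ x ∧ x ≤ s.2.1 ∧ s.1.2 ≤ y ∧ y ≤ s.2.2) := by
  simp [inboxB, and_assoc]

lemma firstHitB_eq (l : List (Int × ((Int × Int) × (Int × Int)))) (x y : Int) :
    firstHitB l x y = match l.find? (fun p => inboxB p.2 x y) with
      | some p => some p.1
      | none => none := by
  induction l with
  | nil => rfl
  | cons p t ih =>
    rw [firstHitB, List.find?_cons]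
    cases hp : inboxB p.2 x y <;> simp [ih]

lemma getC_rectfold (ops : List (Int × ((Int × Int) × (Int × Int))))
    (g : List (List (Option Int))) (Hn Wn : Nat) (hs : Shape g Hn Wn)
    (hok : ∀ p ∈ ops, p.2.2.1 < p.2.1.1 ∨ p.2.2.2 < p.2.1.2 ∨
      (0 ≤ p.2.1.1 ∧ p.2.2.1 < (Wn : Int) ∧ 0 ≤ p.2.1.2 ∧ p.2.2.2 < (Hn : Int)))
    (y x : Nat) (hy : y < Hn) (hx : x < Wn) :
    getC (ops.foldl (fun g p => fill2 g p.2.1.1 p.2.2.1 p.2.1.2 p.2.2.2 p.1) g) y x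
      = match ops.reverse.find? (fun p => inboxB p.2 (x : Int) (y : Int)) with
        | some p => some p.1
        | none => getC g y x := by
  induction ops generalizing g with
  | nil => rfl
  | cons p t ih =>
    rw [List.foldl_cons, List.reverse_cons, List.find?_append]
    rw [ih (fill2 g p.2.1.1 p.2.2.1 p.2.1.2 p.2.2.2 p.1)
      (fill2_shape _ _ _ _ _ _ _ _ hs) (fun q hq => hok q (List.mem_cons_of_mem _ hq))]
    cases hf : t.reverse.find? (fun p => inboxB p.2 (x : Int) (y : Int)) with
    | some q => simp [Option.or]
    | none =>
      simp only [Option.none_or]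
      rw [getC_fill2 g Hn Wn hs _ _ _ _ (hok p (List.mem_cons_self ..)) _ y x hy hx]
      cases hp : inboxB p.2 (x : Int) (y : Int) with
      | true =>
        rw [if_pos ((inboxB_iff _ _ _).1 hp)]
        simp [List.find?, hp]
      | false =>
        have hcnot : ¬ (p.2.1.1 ≤ (x : Int) ∧ (x : Int) ≤ p.2.2.1 ∧ p.2.1.2 ≤ (y : Int) ∧ (y : Int) ≤ p.2.2.2) := fun hc => by
          have h' := (inboxB_iff p.2 (x : Int) (y : Int)).2 hc
          rw [hp] at h'
          exact Bool.noConfusion h'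
        rw [if_neg hcnot]
        simp [List.find?, hp]

lemma getC_linefold (ls : List ((Int × Int) × (Int × Int)))
    (g : List (List (Option String))) (Hn Wn : Nat) (hs : Shape g Hn Wn)
    (hok : ∀ s ∈ ls, s.2.1 < s.1.1 ∨ s.2.2 < s.1.2 ∨
      (0 ≤ s.1.1 ∧ s.2.1 < (Wn : Int) ∧ 0 ≤ s.1.2 ∧ s.2.2 < (Hn : Int)))
    (y x : Nat) (hy : y < Hn) (hx : x < Wn) :
    getC (ls.foldl (fun g l => fill2 g l.1.1 l.2.1 l.1.2 l.2.2 "X") g) y x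
      = if ls.any (fun l => inboxB l (x : Int) (y : Int)) then some "X" else getC g y x := by
  induction ls generalizing g with
  | nil => rfl
  | cons l t ih =>
    rw [List.foldl_cons,
      ih (fill2 g l.1.1 l.2.1 l.1.2 l.2.2 "X") (fill2_shape _ _ _ _ _ _ _ _ hs)
        (fun q hq => hok q (List.mem_cons_of_mem _ hq)),
      getC_fill2 g Hn Wn hs _ _ _ _ (hok l (List.mem_cons_self ..)) _ y x hy hx]
    cases ha : t.any (fun l => inboxB l (x : Int) (y : Int)) with
    | true => simp [List.any_cons, ha]
    | false =>
      simp only [Bool.false_eq_true, if_false]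
      cases hl : inboxB l (x : Int) (y : Int) with
      | true =>
        rw [if_pos ((inboxB_iff _ _ _).1 hl)]
        simp [List.any_cons, ha, hl]
      | false =>
        have hcnot : ¬ (l.1.1 ≤ (x : Int) ∧ (x : Int) ≤ l.2.1 ∧ l.1.2 ≤ (y : Int) ∧ (y : Int) ≤ l.2.2) := fun hc => by
          have h' := (inboxB_iff l (x : Int) (y : Int)).2 hc
          rw [hl] at h'
          exact Bool.noConfusion h'
        rw [if_neg hcnot]
        simp [List.any_cons, ha, hl]

lemma shape_init (α : Type) (Hn Wn : Nat) :
    Shape (List.replicate Hn (List.replicate Wn (none : Option α))) Hn Wn := by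
  constructor
  · simp
  · intro r hr
    rw [List.eq_of_mem_replicate hr]
    simp

lemma getC_init (α : Type) (Hn Wn y x : Nat) :
    getC (List.replicate Hn (List.replicate Wn (none : Option α))) y x = none := by
  by_cases hy : y < Hn
  · by_cases hx : x < Wn
    · simp [getC, List.getD_eq_getElem?_getD, hy, hx]
    · simp [getC, List.getD_eq_getElem?_getD, hy, hx]
  · simp [getC, List.getD_eq_getElem?_getD, hy]

lemma islineB_in (W H : Int) (lines : List ((Int × Int) × (Int × Int))) (x y : Int)
    (h : 0 ≤ x ∧ x < W ∧ 0 ≤ y ∧ y < H) :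
    islineB W H lines x y = lines.any (fun l => inboxB l x y) := by
  obtain ⟨h1, h2, h3, h4⟩ := h
  simp [islineB, h1, h2, h3, h4]

lemma islineA_eq (W H : Int) (lines : List ((Int × Int) × (Int × Int)))
    (LG : List (List (Option String)))
    (hLG : ∀ (y x : Nat), y < H.toNat → x < W.toNat →
      getC LG y x = if lines.any (fun l => inboxB l (x : Int) (y : Int)) then some "X" else none)
    (x y : Int) :
    islineA W H (LG.map (fun r => r)) x y = islineB W H lines x y := by
  rw [List.map_id']
  by_cases h0 : 0 ≤ x ∧ x < W ∧ 0 ≤ y ∧ y < H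
  · obtain ⟨h1, h2, h3, h4⟩ := h0
    have hcond : ¬ (x < 0 ∨ y < 0 ∨ x ≥ W ∨ y ≥ H) := by omega
    rw [islineA, if_neg hcond]
    rw [PySem.List.pyGetD_of_nonneg _ _ h3, PySem.List.pyGetD_of_nonneg _ _ h1]
    have hyn : y.toNat < H.toNat := by omega
    have hxn : x.toNat < W.toNat := by omega
    have hcx : ((x.toNat : Nat) : Int) = x := by omega
    have hcy : ((y.toNat : Nat) : Int) = y := by omega
    have : (LG.getD y.toNat []).getD x.toNat none = getC LG y.toNat x.toNat := rfl
    rw [this, hLG y.toNat x.toNat hyn hxn, hcx, hcy,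
      islineB_in W H lines x y ⟨h1, h2, h3, h4⟩]
    cases lines.any (fun l => inboxB l x y) <;> simp [truthyCell]
  · rw [islineA, if_pos (by omega)]
    cases hB : islineB W H lines x y with
    | false => rfl
    | true =>
      exfalso
      simp only [islineB, Bool.and_eq_true, decide_eq_true_eq] at hB
      omega

def wchain (b l r u d : Bool) : Option String :=
  if b then
    if l && r && u && d then some "┼"
    else if l && r && u then some "┴"
    else if l && r && d then some "┬"
    else if l && u && d then some "┤"
    else if r && u && d then some "├"
    else if l || r then some "─"
    else if u || d then some "│"
    else none
  else none

def wA (W H : Int) (snap : List (List (Option String))) (x y : Int) : Option String :=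
  wchain (islineA W H snap x y) (islineA W H snap (x-1) y) (islineA W H snap (x+1) y)
    (islineA W H snap x (y-1)) (islineA W H snap x (y+1))

lemma updA_eq (W H : Int) (snap : List (List (Option String)))
    (g : List (List (Option String))) (x y : Int) :
    updA W H snap g x y = writeStep (wA W H snap) g (y, x) := by
  unfold updA writeStep wA wchain
  split_ifs <;> rfl

lemma chain_table (b l r u d : Bool) :
    (wchain b l r u d).elim (if b then some "X" else none) some
    = (if b then
        some (glyphsB.getD
          ((if l then 1 else 0) + (if r then 2 else 0) + (if u then 4 else 0)
            + (if d then 8 else 0)) "X")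
       else none) := by
  cases b <;> cases l <;> cases r <;> cases u <;> cases d <;> rfl

lemma getC_updfold (W H : Int) (snap : List (List (Option String)))
    (g : List (List (Option String))) (hs : Shape g H.toNat W.toNat)
    (y x : Nat) (hy : y < H.toNat) (hx : x < W.toNat) :
    getC ((PySem.List.pyRange 0 W 1).foldl (fun g x =>
        (PySem.List.pyRange 0 H 1).foldl (fun g y => updA W H snap g x y) g) g) y x
      = (wA W H snap (x : Int) (y : Int)).elim (getC g y x) some := by
  have h1 : (PySem.List.pyRange 0 W 1).foldl (fun g x =>
        (PySem.List.pyRange 0 H 1).foldl (fun g y => updA W H snap g x y) g) g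
      = ((PySem.List.pyRange 0 W 1).flatMap (fun x =>
          (PySem.List.pyRange 0 H 1).map (fun y => (y, x)))).foldl
          (fun g p => updA W H snap g p.2 p.1) g :=
    nested_foldl (PySem.List.pyRange 0 W 1) (fun _ => PySem.List.pyRange 0 H 1)
      (fun g p => updA W H snap g p.2 p.1) g
  rw [h1]
  have hfn : (fun (g : List (List (Option String))) (p : Int × Int) => updA W H snap g p.2 p.1)
      = writeStep (wA W H snap) := by
    funext g p
    obtain ⟨a, b⟩ := p
    exact updA_eq W H snap g b a
  rw [hfn]
  have hin : ∀ p ∈ (PySem.List.pyRange 0 W 1).flatMap (fun x =>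
      (PySem.List.pyRange 0 H 1).map (fun y => (y, x))),
      0 ≤ p.1 ∧ p.1 < ((H.toNat : Nat) : Int) ∧ 0 ≤ p.2 ∧ p.2 < ((W.toNat : Nat) : Int) := by
    rintro ⟨a, b⟩ hp
    simp only [List.mem_flatMap, List.mem_map, PySem.List.mem_pyRange_one,
      Prod.mk.injEq] at hp
    obtain ⟨xx, hxx, yy, hyy, e1, e2⟩ := hp
    omega
  have h2 := getC_foldl_write (wA W H snap) _ g H.toNat W.toNat hs hin y x hy hx
  have hmem : ((y : Int), (x : Int)) ∈ (PySem.List.pyRange 0 W 1).flatMap (fun x =>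
      (PySem.List.pyRange 0 H 1).map (fun y => (y, x))) := by
    simp only [List.mem_flatMap, List.mem_map, PySem.List.mem_pyRange_one]
    exact ⟨(x : Int), by omega, (y : Int), by omega, rfl⟩
  exact h2.trans (by rw [if_pos hmem])

theorem draw_as_ascii_art_grid_spec : Claim_unchanged_draw_as_ascii_art_grid := by
  unfold Claim_unchanged_draw_as_ascii_art_grid
  intro cs lines rects _hdom hpre
  unfold Spec_draw_as_ascii_art_grid
  intro hnd
  obtain ⟨W, H⟩ := cs
  obtain ⟨hpl, hpr⟩ := hpre
  have hndL : ∀ s ∈ lines ++ rects,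
      ¬ (s.1.1 ≤ s.2.1 ∧ s.1.2 ≤ s.2.2 ∧ (s.1.1 < 0 ∨ s.1.2 < 0)) := by
    intro s hs hc
    exact hnd ⟨s, hs, hc⟩
  have hokL : ∀ s ∈ lines, s.2.1 < s.1.1 ∨ s.2.2 < s.1.2 ∨
      (0 ≤ s.1.1 ∧ s.2.1 < ((W.toNat : Nat) : Int) ∧ 0 ≤ s.1.2 ∧ s.2.2 < ((H.toNat : Nat) : Int)) := by
    intro s hs
    have h1 := hpl s hs
    have h2 := hndL s (List.mem_append_left _ hs)
    unfold nonRaiseSeg at h1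
    omega
  have hokR : ∀ p ∈ PySem.List.enumerate rects 0, p.2.2.1 < p.2.1.1 ∨ p.2.2.2 < p.2.1.2 ∨
      (0 ≤ p.2.1.1 ∧ p.2.2.1 < ((W.toNat : Nat) : Int) ∧ 0 ≤ p.2.1.2 ∧ p.2.2.2 < ((H.toNat : Nat) : Int)) := by
    intro p hp
    have hm : p.2 ∈ (PySem.List.enumerate rects 0).map (fun q => q.2) :=
      List.mem_map_of_mem hp
    rw [PySem.List.map_snd_enumerate] at hm
    have h1 := hpr p.2 hm
    have h2 := hndL p.2 (List.mem_append_right _ hm)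
    unfold nonRaiseSeg at h1
    omega
  simp only [draw_as_ascii_art_grid, draw_as_ascii_art_grid_alt]
  set LG := lines.foldl (fun g l => fill2 g l.1.1 l.2.1 l.1.2 l.2.2 "X")
      (List.replicate H.toNat (List.replicate W.toNat (none : Option String))) with hLGdef
  set snap := LG.map (fun row => row) with hsnapdef
  set FG := (PySem.List.pyRange 0 W 1).foldl (fun g x =>
      (PySem.List.pyRange 0 H 1).foldl (fun g y => updA W H snap g x y) g) LG with hFGdef
  set RG := (PySem.List.enumerate rects 0).foldl
      (fun g p => fill2 g p.2.1.1 p.2.2.1 p.2.1.2 p.2.2.2 p.1)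
      (List.replicate H.toNat (List.replicate W.toNat (none : Option Int))) with hRGdef
  have hsL : Shape LG H.toNat W.toNat := by
    rw [hLGdef]
    exact foldl_shape _ H.toNat W.toNat
      (fun g b hs => fill2_shape _ _ _ _ _ _ _ _ hs) lines _ (shape_init _ _ _)
  have hLGcell : ∀ (y x : Nat), y < H.toNat → x < W.toNat →
      getC LG y x = if lines.any (fun l => inboxB l (x : Int) (y : Int)) then some "X" else none := by
    intro y x hy hx
    rw [hLGdef, getC_linefold lines _ H.toNat W.toNat (shape_init _ _ _) hokL y x hy hx, getC_init]
  have hIl : ∀ x y : Int, islineA W H snap x y = islineB W H lines x y := by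
    rw [hsnapdef]
    exact islineA_eq W H lines LG hLGcell
  have hstep1 : ∀ (g : List (List (Option String))) (b : Int), Shape g H.toNat W.toNat →
      Shape ((PySem.List.pyRange 0 H 1).foldl (fun g y => updA W H snap g b y) g) H.toNat W.toNat := by
    intro g b hs
    apply foldl_shape _ _ _ _ _ _ hs
    intro g' b' hs'
    rw [updA_eq]
    unfold writeStep
    cases wA W H snap b b' with
    | none => exact hs'
    | some v => exact pySet2_shape _ _ _ _ _ _ hs'
  have hsF : Shape FG H.toNat W.toNat := by
    rw [hFGdef]
    exact foldl_shape _ _ _ hstep1 _ _ hsL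
  have hsR : Shape RG H.toNat W.toNat := by
    rw [hRGdef]
    exact foldl_shape _ H.toNat W.toNat
      (fun g b hs => fill2_shape _ _ _ _ _ _ _ _ hs) _ _ (shape_init _ _ _)
  simp only [Prod.mk.injEq]
  constructor
  · -- line grids agree cell by cell
    apply List.ext_getElem
    · rw [hsF.1]
      simp [PySem.List.length_pyRange_one]
    · intro i h1 h2
      have hiH : i < H.toNat := by rw [hsF.1] at h1; exact h1
      have hrowlen : (FG[i]'h1).length = W.toNat := hsF.2 _ (List.getElem_mem h1)
      rw [List.getElem_map, PySem.List.getElem_pyRange_one]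
      simp only [zero_add]
      apply List.ext_getElem
      · rw [hrowlen]
        simp [PySem.List.length_pyRange_one]
      · intro j hj1 hj2
        have hjW : j < W.toNat := by rw [hrowlen] at hj1; exact hj1
        rw [List.getElem_map, PySem.List.getElem_pyRange_one]
        simp only [zero_add]
        rw [← getC_eq_getElem FG i j h1 hj1]
        rw [hFGdef, getC_updfold W H snap LG hsL i j hiH hjW]
        rw [hLGcell i j hiH hjW]
        simp only [wA, hIl]
        have hb : islineB W H lines (j : Int) (i : Int)
            = lines.any (fun l => inboxB l (j : Int) (i : Int)) :=
          islineB_in W H lines _ _ ⟨by omega, by omega, by omega, by omega⟩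
        rw [← hb]
        simp only [lineCharB]
        exact chain_table (islineB W H lines (j : Int) (i : Int))
          (islineB W H lines ((j : Int) - 1) (i : Int))
          (islineB W H lines ((j : Int) + 1) (i : Int))
          (islineB W H lines (j : Int) ((i : Int) - 1))
          (islineB W H lines (j : Int) ((i : Int) + 1))
  · -- rectangle grids agree cell by cell
    apply List.ext_getElem
    · rw [hsR.1]
      simp [PySem.List.length_pyRange_one]
    · intro i h1 h2
      have hiH : i < H.toNat := by rw [hsR.1] at h1; exact h1
      have hrowlen : (RG[i]'h1).length = W.toNat := hsR.2 _ (List.getElem_mem h1)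
      rw [List.getElem_map, PySem.List.getElem_pyRange_one]
      simp only [zero_add]
      apply List.ext_getElem
      · rw [hrowlen]
        simp [PySem.List.length_pyRange_one]
      · intro j hj1 hj2
        have hjW : j < W.toNat := by rw [hrowlen] at hj1; exact hj1
        rw [List.getElem_map, PySem.List.getElem_pyRange_one]
        simp only [zero_add]
        rw [← getC_eq_getElem RG i j h1 hj1]
        rw [hRGdef, getC_rectfold _ _ H.toNat W.toNat (shape_init _ _ _) hokR i j hiH hjW,
          getC_init, firstHitB_eq]

theorem draw_as_ascii_art_grid_changed : Claim_changed_draw_as_ascii_art_grid := by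
  unfold Claim_changed_draw_as_ascii_art_grid
  decide
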